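-- pv_equiv track=rewrite | github.com/varunbinoy/stepd-resume-scorer | app.py | extract_evidence
-- ===== SOURCE A (Python) =====
-- def extract_evidence(tokens, term, window=10):
--     snippets = []
--     for i, t in enumerate(tokens):
--         if t == term:
--             start = max(0, i-window)
--             end = min(len(tokens), i+window)
--             snippets.append(" ".join(tokens[start:end]))
--             if len(snippets) >= 2:
--                 break
--     return snippets
-- ===== SOURCE B (Python) =====
-- def extract_evidence(tokens, term, window=10):
--     def snip(i):
--         return " ".join(tokens[max(0, i - window):min(len(tokens), i + window)])
--     if term not in tokens:
--         return []
--     i = tokens.index(term)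
--     rest = tokens[i+1:]
--     if term not in rest:
--         return [snip(i)]
--     return [snip(i), snip(i + 1 + rest.index(term))]
-- ===== Notes on version B (the rewrite author's own statement) =====
-- stated objective: idiomatic
-- what changed: Replaces A's enumerate loop with early break by direct built-in searches: list.index finds the first occurrence, a second list.index on the tail past it finds the second, and each found position is mapped to its snippet; there is no explicit scan over (index, token) pairs at all.
import Mathlib
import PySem

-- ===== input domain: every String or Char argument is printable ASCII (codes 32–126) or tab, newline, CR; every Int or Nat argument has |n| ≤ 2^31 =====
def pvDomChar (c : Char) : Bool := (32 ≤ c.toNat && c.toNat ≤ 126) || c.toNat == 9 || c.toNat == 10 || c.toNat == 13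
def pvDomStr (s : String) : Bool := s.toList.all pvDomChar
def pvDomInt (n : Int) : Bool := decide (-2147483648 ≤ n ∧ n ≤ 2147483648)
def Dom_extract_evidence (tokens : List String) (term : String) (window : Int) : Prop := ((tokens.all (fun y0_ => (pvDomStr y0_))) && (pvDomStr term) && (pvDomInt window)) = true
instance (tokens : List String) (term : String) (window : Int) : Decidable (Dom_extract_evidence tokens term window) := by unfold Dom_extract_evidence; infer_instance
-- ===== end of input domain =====

-- B replaces A's enumerate loop with early break by built-in index searches: list.index finds
-- the first occurrence, a second list.index on the tail past it finds the second; same value.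

-- ===== PORT A =====
-- loop 'for i, t in enumerate(tokens): … break' as structural recursion over the enumerated list
def extractGoA (tokens : List String) (term : String) (window : Int) :
    List (Int × String) → List String → List String
  | [], snippets => snippets
  | (i, t) :: rest, snippets =>
    if t == term then
      let start := max 0 (i - window)
      let stop := min (PySem.List.len tokens) (i + window)
      let snippets' := snippets ++ [PySem.Str.join " " (PySem.List.slice tokens (some start) (some stop))]
      if 2 ≤ snippets'.length then snippets'
      else extractGoA tokens term window rest snippets'
    else extractGoA tokens term window rest snippets

def extract_evidence (tokens : List String) (term : String) (window : Int) : List String :=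
  extractGoA tokens term window (PySem.List.enumerate tokens 0) []

-- ===== PORT B =====
-- helper 'snip(i)' of Source B
def snipB (tokens : List String) (window : Int) (i : Int) : String :=
  PySem.Str.join " " (PySem.List.slice tokens (some (max 0 (i - window)))
    (some (min (PySem.List.len tokens) (i + window))))

def extract_evidence_alt (tokens : List String) (term : String) (window : Int) : List String :=
  -- 'if term not in tokens: return []' / 'i = tokens.index(term)' as one match on index?
  match PySem.List.index? tokens term with
  | none => []
  | some i =>
    let rest := PySem.List.slice tokens (some ((i : Int) + 1)) none
    match PySem.List.index? rest term with
    | none => [snipB tokens window i]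
    | some j => [snipB tokens window i, snipB tokens window ((i : Int) + 1 + (j : Int))]

-- ===== PRECONDITION & SPEC =====
def Spec_extract_evidence (tokens : List String) (term : String) (window : Int) (out : List String) : Prop := out = extract_evidence_alt tokens term window
instance (tokens : List String) (term : String) (window : Int) (out : List String) : Decidable (Spec_extract_evidence tokens term window out) := by unfold Spec_extract_evidence; infer_instance

-- ===== CLAIM (what is proved, stated in full; the proofs are below) =====
def Claim_equal_extract_evidence : Prop := ∀ (tokens : List String) (term : String) (window : Int), Dom_extract_evidence tokens term window → Spec_extract_evidence tokens term window (extract_evidence tokens term window)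

-- ===== LEMMAS AND PROOFS =====

-- A's loop, unfolded: acc ++ snippets of the first (2 - |acc|) matching positions
lemma extractGoA_eq (tokens : List String) (term : String) (window : Int) :
    ∀ (l : List (Int × String)) (acc : List String), acc.length < 2 →
      extractGoA tokens term window l acc =
        acc ++ ((l.filter (fun p => p.2 == term)).take (2 - acc.length)).map
          (fun p => snipB tokens window p.1) := by
  intro l
  induction l with
  | nil => intro acc _; simp [extractGoA]
  | cons hd tl ih =>
    intro acc hacc
    obtain ⟨i, t⟩ := hd
    by_cases ht : t == term
    · simp only [extractGoA, ht, if_pos]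
      by_cases h2 : 2 ≤ (acc ++ [PySem.Str.join " " (PySem.List.slice tokens (some (max 0 (i - window))) (some (min (PySem.List.len tokens) (i + window))))]).length
      · simp only [if_pos h2]
        have hlen : acc.length = 1 := by simp only [List.length_append, List.length_cons, List.length_nil] at h2; omega
        simp [ht, hlen, snipB]
      · simp only [if_neg h2]
        have hlen : acc.length = 0 := by simp only [List.length_append, List.length_cons, List.length_nil] at h2; omega
        have hacc0 : acc = [] := List.eq_nil_of_length_eq_zero hlen
        subst hacc0
        rw [ih _ (by simp)]
        simp [ht, snipB]
    · simp only [extractGoA, ht, if_neg, Bool.false_eq_true, not_false_iff]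
      rw [ih acc hacc]
      simp [ht]

-- no occurrence ⇒ the filtered enumeration is empty
lemma filter_enumerate_nil (xs : List String) (term : String) (s : Int)
    (h : term ∉ xs) :
    (PySem.List.enumerate xs s).filter (fun p => p.2 == term) = [] := by
  apply List.filter_eq_nil_iff.mpr
  intro p hp
  obtain ⟨k, hk, rfl⟩ := (PySem.List.mem_enumerate_iff _ _ _).mp hp
  simp only [beq_iff_eq]
  intro hEq
  exact h (hEq ▸ List.getElem_mem hk)

-- first occurrence at k ⇒ the filtered enumeration starts with (s+k, term) and continues past it
lemma filter_enumerate_cons (xs : List String) (term : String) (s : Int) (k : Nat)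
    (h : PySem.List.index? xs term = some k) :
    (PySem.List.enumerate xs s).filter (fun p => p.2 == term) =
      (s + (k : Int), term) ::
        (PySem.List.enumerate (xs.drop (k + 1)) (s + (k : Int) + 1)).filter
          (fun p => p.2 == term) := by
  obtain ⟨pre, suf, hxs, hlen, hnot⟩ := (PySem.List.index?_eq_some_iff _ _ _).mp h
  subst hxs
  have hdrop : (pre ++ term :: suf).drop (k + 1) = suf := by
    have : pre ++ term :: suf = (pre ++ [term]) ++ suf := by simp
    rw [this, show k + 1 = (pre ++ [term]).length by simp [hlen], List.drop_left]
  rw [hdrop]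
  rw [show pre ++ term :: suf = pre ++ term :: suf from rfl,
    PySem.List.enumerate_append]
  rw [List.filter_append, filter_enumerate_nil pre term s hnot]
  rw [PySem.List.enumerate_cons]
  simp only [List.nil_append, List.filter_cons]
  simp [hlen]

-- ===== VERDICT (by name: the statement is the Claim_ definition above) =====
theorem extract_evidence_spec : Claim_equal_extract_evidence := by
  intro tokens term window _
  unfold Spec_extract_evidence extract_evidence extract_evidence_alt
  rw [extractGoA_eq tokens term window _ [] (by simp)]
  cases h : PySem.List.index? tokens term with
  | none =>
    have hmem : term ∉ tokens := (PySem.List.index?_eq_none_iff _ _).mp h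
    rw [filter_enumerate_nil tokens term 0 hmem]
    simp
  | some i =>
    rw [filter_enumerate_cons tokens term 0 i h]
    have hslice : PySem.List.slice tokens (some ((i : Int) + 1)) none = tokens.drop (i + 1) := by
      rw [show ((i : Int) + 1) = ((i + 1 : Nat) : Int) by push_cast; ring,
        PySem.List.slice_from_natCast]
    simp only [hslice]
    cases h2 : PySem.List.index? (tokens.drop (i + 1)) term with
    | none =>
      have hmem : term ∉ tokens.drop (i + 1) := (PySem.List.index?_eq_none_iff _ _).mp h2
      rw [filter_enumerate_nil _ term _ hmem]
      simp
    | some j =>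
      rw [filter_enumerate_cons _ term _ j h2]
      simp
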